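-- pv_equiv track=rewrite | github.com/nongdamgom1over/zaksimsamilllll | 프로그래머스/2/132265. 롤케이크 자르기/롤케이크 자르기.py | solution
-- ===== SOURCE A (Python) =====
-- from collections import Counter
--
-- def solution(topping):
--     right = Counter(topping)   # 오른쪽에 전체가 있다고 시작
--     left_set = set()
--     right_kinds = len(right)
--     answer = 0
--
--     # i에서 자른다는 건: topping[i]는 왼쪽에 포함, i+1부터 오른쪽
--     # 그래서 끝 원소는 왼쪽으로 옮기고 자를 수 없으니 n-1까지만
--     for i in range(len(topping) - 1):
--         x = topping[i]
--
--         # 왼쪽에 추가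
--         left_set.add(x)
--
--         # 오른쪽에서 제거(1개 이동)
--         right[x] -= 1
--         if right[x] == 0:
--             del right[x]
--             right_kinds -= 1
--
--         if len(left_set) == right_kinds:
--             answer += 1
--
--     return answer
-- ===== SOURCE B (Python) =====
-- def solution(topping):
--     # backward pass: rd[i] = number of distinct toppings strictly after index i
--     rd = []
--     seen = set()
--     for x in reversed(topping):
--         rd.append(len(seen))
--         seen.add(x)
--     rd.reverse()
--     # forward pass: grow the left set and compare with the precomputed table
--     left = set()
--     answer = 0
--     for x, r in list(zip(topping, rd))[:-1]:
--         left.add(x)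
--         if len(left) == r:
--             answer += 1
--     return answer
-- ===== Notes on version B (the rewrite author's own statement) =====
-- stated objective: alternative
-- what changed: Replaces A's single interleaved pass with incremental Counter decrement/deletion by two separate passes: a backward pass precomputing a suffix-distinct-count table with a set, then a forward pass comparing the growing left set against the table.
import Mathlib
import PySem

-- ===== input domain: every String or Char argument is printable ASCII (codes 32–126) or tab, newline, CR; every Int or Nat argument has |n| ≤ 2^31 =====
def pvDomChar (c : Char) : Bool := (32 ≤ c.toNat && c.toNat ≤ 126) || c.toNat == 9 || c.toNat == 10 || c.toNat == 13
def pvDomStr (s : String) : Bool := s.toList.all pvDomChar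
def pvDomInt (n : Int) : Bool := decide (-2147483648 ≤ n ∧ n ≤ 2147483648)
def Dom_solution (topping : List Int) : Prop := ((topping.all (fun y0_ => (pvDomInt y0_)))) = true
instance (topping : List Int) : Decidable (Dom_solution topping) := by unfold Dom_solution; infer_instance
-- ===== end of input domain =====

-- B replaces A's single pass with incremental Counter removal by a backward pass
-- precomputing a suffix-distinct-count table plus a forward comparison pass (alternative decomposition, same cost).

-- ===== PORT A =====
-- loop body of A's for-loop (right counter, left set, right_kinds, answer)
def stepA (s : PySem.Dict Int Int × PySem.Set Int × Int × Int) (x : Int) :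
    PySem.Dict Int Int × PySem.Set Int × Int × Int :=
  let left := PySem.Set.add s.2.1 x
  let r1 := s.1.insert x (s.1.getD x 0 - 1)
  if r1.getD x 0 = 0 then
    (r1.erase x, left, s.2.2.1 - 1,
      if PySem.Set.len left = s.2.2.1 - 1 then s.2.2.2 + 1 else s.2.2.2)
  else
    (r1, left, s.2.2.1,
      if PySem.Set.len left = s.2.2.1 then s.2.2.2 + 1 else s.2.2.2)

def solution (topping : List Int) : Int :=
  let right0 := PySem.Dict.counter topping
  ((PySem.List.pyRange 0 ((topping.length : Int) - 1)).foldl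
      (fun s i => stepA s (PySem.List.pyGetD topping i 0))
      (right0, PySem.Set.empty, (right0.size : Int), 0)).2.2.2

-- ===== PORT B =====
-- backward pass: (rd table, set of elements seen so far from the right)
def buildRD : List Int → List Int × PySem.Set Int
  | [] => ([], PySem.Set.empty)
  | x :: xs =>
    let p := buildRD xs
    (PySem.Set.len p.2 :: p.1, PySem.Set.add p.2 x)

-- forward pass over (topping[i], rd[i]) pairs
def fwdLoop : List (Int × Int) → PySem.Set Int → Int → Int
  | [], _, ans => ans
  | p :: rest, left, ans =>
    let left' := PySem.Set.add left p.1
    fwdLoop rest left' (if PySem.Set.len left' = p.2 then ans + 1 else ans)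

def solution_alt (topping : List Int) : Int :=
  fwdLoop ((topping.zip (buildRD topping).1).dropLast) PySem.Set.empty 0

-- ===== PRECONDITION & SPEC =====
def Spec_solution (topping : List Int) (out : Int) : Prop := out = solution_alt topping
instance (topping : List Int) (out : Int) : Decidable (Spec_solution topping out) := by unfold Spec_solution; infer_instance

-- ===== CLAIM (what is proved, stated in full; the proofs are below) =====
def Claim_equal_solution : Prop := ∀ (topping : List Int), Dom_solution topping → Spec_solution topping (solution topping)

-- ===== LEMMAS AND PROOFS =====

-- distinct-element count of a list, as Int
def dcount (xs : List Int) : Int := ((PySem.Set.ofList xs).length : Int)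

-- the pair list B's forward pass consumes, for prefix l with trailing part t
def zipRDT : List Int → List Int → List (Int × Int)
  | [], _ => []
  | x :: xs, t => (x, dcount (xs ++ t)) :: zipRDT xs t

theorem getD_erase' (d : PySem.Dict Int Int) (k k' v : Int) :
    (d.erase k).getD k' v = if k' = k then v else d.getD k' v := by
  obtain ⟨items⟩ := d
  simp only [PySem.Dict.erase, PySem.Dict.getD, PySem.Dict.get?]
  induction items with
  | nil => simp
  | cons p rest ih =>
    simp only [List.filter_cons]
    by_cases h1 : p.1 = k <;> by_cases h2 : p.1 = k' <;> simp_all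

theorem dcount_cons (x : Int) (xs : List Int) :
    dcount (x :: xs) = if x ∈ xs then dcount xs else dcount xs + 1 := by
  unfold dcount
  rw [PySem.Set.ofList_cons]
  by_cases h : x ∈ xs
  · have hmem : x ∈ PySem.Set.ofList xs := (PySem.Set.mem_ofList xs x).2 h
    have hnd := PySem.Set.nodup_ofList xs
    have he : (PySem.Set.ofList xs).discard x = (PySem.Set.ofList xs).erase x := by
      rw [hnd.erase_eq_filter]; rfl
    have hlen := List.length_erase_of_mem hmem
    have hpos : 0 < (PySem.Set.ofList xs).length := List.length_pos_of_mem hmem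
    simp only [he, List.length_cons, hlen, h, if_pos]
    omega
  · have he : (PySem.Set.ofList xs).discard x = PySem.Set.ofList xs := by
      apply List.filter_eq_self.2
      intro a ha
      simp only [Bool.not_eq_eq_eq_not, Bool.not_true, beq_eq_false_iff_ne, ne_eq]
      rintro rfl; exact h ((PySem.Set.mem_ofList xs a).1 ha)
    simp [he, h]

theorem buildRD_set (xs : List Int) :
    (buildRD xs).2.Nodup ∧ ∀ y, (y ∈ (buildRD xs).2 ↔ y ∈ xs) := by
  induction xs with
  | nil => exact ⟨List.nodup_nil, by simp [buildRD, PySem.Set.empty]⟩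
  | cons x xs ih =>
    refine ⟨PySem.Set.nodup_add _ _ ih.1, fun y => ?_⟩
    rw [show (buildRD (x :: xs)).2 = PySem.Set.add (buildRD xs).2 x from rfl,
      PySem.Set.mem_add, ih.2 y]
    simp [or_comm]

theorem setlen_buildRD (xs : List Int) : PySem.Set.len (buildRD xs).2 = dcount xs := by
  have h := buildRD_set xs
  have hperm : (buildRD xs).2.Perm (PySem.Set.ofList xs) := by
    rw [List.perm_ext_iff_of_nodup h.1 (PySem.Set.nodup_ofList xs)]
    intro a
    rw [h.2 a, PySem.Set.mem_ofList]
  simp [PySem.Set.len, dcount, hperm.length_eq]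

theorem zip_buildRD (l t : List Int) :
    (l ++ t).zip (buildRD (l ++ t)).1 = zipRDT l t ++ t.zip (buildRD t).1 := by
  induction l with
  | nil => simp [zipRDT]
  | cons x l ih =>
    simp only [List.cons_append]
    rw [show (buildRD (x :: (l ++ t))).1
        = PySem.Set.len (buildRD (l ++ t)).2 :: (buildRD (l ++ t)).1 from rfl,
      List.zip_cons_cons, ih, setlen_buildRD]
    rfl

theorem size_counter (xs : List Int) :
    ((PySem.Dict.counter xs).size : Int) = dcount xs := by
  have h : (PySem.Dict.counter xs).keys.length = (PySem.Set.ofList xs).length := by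
    rw [PySem.Dict.keys_counter]
  simp only [PySem.Dict.keys, List.length_map, PySem.Dict.size] at h ⊢
  simp [dcount, h]

theorem main_lemma (l t : List Int) (left : PySem.Set Int) (ans k : Int)
    (d : PySem.Dict Int Int)
    (hd : ∀ y, d.getD y 0 = (((l ++ t).count y : Nat) : Int))
    (hk : k = dcount (l ++ t)) :
    (l.foldl stepA (d, left, k, ans)).2.2.2 = fwdLoop (zipRDT l t) left ans := by
  induction l generalizing left ans k d with
  | nil => rfl
  | cons x xs ih =>
    have hcnt : d.getD x 0 = (((xs ++ t).count x : Nat) : Int) + 1 := by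
      rw [hd x, show ((x :: xs) ++ t) = x :: (xs ++ t) from rfl, List.count_cons_self]
      push_cast; ring
    have hkc : k = dcount (x :: (xs ++ t)) := hk
    rw [show zipRDT (x :: xs) t = (x, dcount (xs ++ t)) :: zipRDT xs t from rfl,
      show fwdLoop ((x, dcount (xs ++ t)) :: zipRDT xs t) left ans
        = fwdLoop (zipRDT xs t) (PySem.Set.add left x)
            (if PySem.Set.len (PySem.Set.add left x) = dcount (xs ++ t) then ans + 1 else ans)
        from rfl]
    simp only [List.foldl_cons]
    unfold stepA
    dsimp only
    rw [PySem.Dict.getD_insert_self, hcnt]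
    by_cases h0 : (xs ++ t).count x = 0
    · have hmem : x ∉ xs ++ t := List.count_eq_zero.1 h0
      have hkk : k = dcount (xs ++ t) + 1 := by
        rw [hkc, dcount_cons, if_neg hmem]
      rw [if_pos (by rw [h0]; simp)]
      have hk' : k - 1 = dcount (xs ++ t) := by omega
      rw [hk']
      refine ih _ _ _ _ (fun y => ?_) rfl
      rw [getD_erase']
      by_cases hy : y = x
      · subst hy
        rw [if_pos rfl, h0]
        simp
      · rw [if_neg hy, PySem.Dict.getD_insert, if_neg hy, hd y,
          show ((x :: xs) ++ t) = x :: (xs ++ t) from rfl]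
        simp [Ne.symm hy]
    · have hmem : x ∈ xs ++ t := by
        by_contra hc
        exact h0 (List.count_eq_zero.2 hc)
      have hkk : k = dcount (xs ++ t) := by
        rw [hkc, dcount_cons, if_pos hmem]
      rw [if_neg (by omega)]
      rw [hkk]
      refine ih _ _ _ _ (fun y => ?_) rfl
      by_cases hy : y = x
      · subst hy
        rw [PySem.Dict.getD_insert_self]
        ring
      · rw [PySem.Dict.getD_insert, if_neg hy, hd y,
          show ((x :: xs) ++ t) = x :: (xs ++ t) from rfl]
        simp [Ne.symm hy]

theorem A_concat (l : List Int) (z : Int) :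
    solution (l ++ [z]) =
      (l.foldl stepA (PySem.Dict.counter (l ++ [z]), PySem.Set.empty,
        ((PySem.Dict.counter (l ++ [z])).size : Int), 0)).2.2.2 := by
  unfold solution
  dsimp only
  have hlen : ((l ++ [z]).length : Int) - 1 = PySem.List.len l := by
    simp [PySem.List.len]
  rw [hlen]
  rw [PySem.List.foldl_congr_mem (PySem.List.pyRange 0 (PySem.List.len l))
      (fun s i => stepA s (PySem.List.pyGetD (l ++ [z]) i 0))
      (fun s i => stepA s (PySem.List.pyGetD l i 0)) _
      (fun acc i hi => by
        have hm := (PySem.List.mem_pyRange_one).1 hi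
        rw [PySem.List.len_eq] at hm
        have hgd : PySem.List.pyGetD (l ++ [z]) i 0 = PySem.List.pyGetD l i 0 := by
          rw [PySem.List.pyGetD_eq_getElem (l ++ [z]) 0 hm.1 (by simp; omega),
            PySem.List.pyGetD_eq_getElem l 0 hm.1 (by omega)]
          exact List.getElem_append_left (by omega)
        simp [hgd])]
  rw [PySem.List.foldl_pyRange_pyGetD l 0 stepA _ le_rfl]
  rw [Int.toNat_zero, List.drop_zero]

theorem B_concat (l : List Int) (z : Int) :
    solution_alt (l ++ [z]) = fwdLoop (zipRDT l [z]) PySem.Set.empty 0 := by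
  unfold solution_alt
  rw [zip_buildRD l [z]]
  rw [show ([z] : List Int).zip (buildRD [z]).1 = [(z, 0)] from rfl]
  rw [List.dropLast_concat]

-- ===== VERDICT (by name: the statement is the Claim_ definition above) =====
theorem solution_spec : Claim_equal_solution := by
  intro topping _
  unfold Spec_solution
  rcases topping.eq_nil_or_concat' with rfl | ⟨l, z, rfl⟩
  · rfl
  · rw [A_concat, B_concat]
    exact main_lemma l [z] PySem.Set.empty 0
      ((PySem.Dict.counter (l ++ [z])).size : Int) (PySem.Dict.counter (l ++ [z]))
      (fun y => PySem.Dict.getD_counter _ _) (size_counter _)
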